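-- pv_equiv track=rewrite | github.com/swapniljadhav96/GFG_POTD_Streak | Trail of ones.py | numberOfConsecutiveOnes
-- ===== SOURCE A (Python) =====
-- def numberOfConsecutiveOnes(n):
--     MOD = int(1e9+7)
--
--     if n == 2:
--         return 1
--
--     dp = [0] * (n + 1)
--
--     # Base cases
--     dp[0] = 1
--     dp[1] = 2
--
--     for i in range(2, n + 1):
--         dp[i] = (dp[i-1] + dp[i-2]) % MOD
--
--     total = pow(2, n, MOD)
--
--     return (total - dp[n] + MOD) % MOD
-- ===== SOURCE B (Python) =====
-- def numberOfConsecutiveOnes(n):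
--     MOD = 10**9 + 7
--
--     # Fast-doubling Fibonacci: fd(k) = (F(k) % MOD, F(k+1) % MOD), F(0)=0, F(1)=1
--     def fd(k):
--         if k == 0:
--             return (0, 1)
--         a, b = fd(k // 2)
--         c = a * (2 * b - a) % MOD
--         d = (a * a + b * b) % MOD
--         if k % 2:
--             return (d, (c + d) % MOD)
--         return (c, d)
--
--     fib = fd(n + 2)[0]
--     return (pow(2, n, MOD) - fib) % MOD
-- ===== Notes on version B (the rewrite author's own statement) =====
-- stated objective: faster
-- what changed: Replaces the O(n) dp table (Fibonacci tabulation) by fast-doubling Fibonacci, computing (2^n - F(n+2)) mod 1e9+7 in O(log n).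
import Mathlib
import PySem

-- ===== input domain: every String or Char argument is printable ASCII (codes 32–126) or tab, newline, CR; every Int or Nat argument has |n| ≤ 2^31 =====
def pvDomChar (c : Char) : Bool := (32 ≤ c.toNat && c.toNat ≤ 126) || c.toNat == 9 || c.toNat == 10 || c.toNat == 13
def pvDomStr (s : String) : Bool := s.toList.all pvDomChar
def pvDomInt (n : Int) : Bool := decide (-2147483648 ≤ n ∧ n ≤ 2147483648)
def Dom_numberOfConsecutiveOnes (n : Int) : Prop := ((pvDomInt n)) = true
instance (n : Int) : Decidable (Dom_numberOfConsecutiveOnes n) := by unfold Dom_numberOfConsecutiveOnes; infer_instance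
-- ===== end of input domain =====

-- B replaces A's O(n) Fibonacci dp table by O(log n) fast-doubling Fibonacci (objective: faster).


-- MOD = int(1e9+7), identical constant in both Pythons
def pvM : Int := 1000000007

-- pow(2, k, MOD), Python's built-in three-argument pow (square-and-multiply); used by both ports
def pvPow2Mod (k : Nat) : Int :=
  if h : k = 0 then 1 % pvM
  else
    let r := pvPow2Mod (k / 2)
    if k % 2 = 0 then r * r % pvM else r * r * 2 % pvM
termination_by k
decreasing_by exact Nat.div_lt_self (Nat.pos_of_ne_zero h) one_lt_two

-- ===== PORT A =====
def numberOfConsecutiveOnes (n : Int) : Int :=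
  if n = 2 then 1
  else
    -- dp = [0] * (n + 1); dp[0] = 1; dp[1] = 2   (Python list -> Array, O(1) store)
    let dp : Array Int := ((Array.replicate (n + 1).toNat (0 : Int)).setIfInBounds 0 1).setIfInBounds 1 2
    -- for i in range(2, n + 1): dp[i] = (dp[i-1] + dp[i-2]) % MOD
    let dp := (PySem.List.pyRange 2 (n + 1) 1).foldl
      (fun dp i =>
        dp.setIfInBounds i.toNat ((dp.getD (i - 1).toNat 0 + dp.getD (i - 2).toNat 0) % pvM))
      dp
    let total := pvPow2Mod n.toNat
    (total - dp.getD n.toNat 0 + pvM) % pvM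

-- ===== PORT B =====
-- fd(k) = (F(k) % MOD, F(k+1) % MOD) by fast doubling
def fdAlt (k : Nat) : Int × Int :=
  if h : k = 0 then (0, 1)
  else
    let p := fdAlt (k / 2)
    let a := p.1
    let b := p.2
    let c := a * (2 * b - a) % pvM
    let d := (a * a + b * b) % pvM
    if k % 2 = 1 then (d, (c + d) % pvM) else (c, d)
termination_by k
decreasing_by exact Nat.div_lt_self (Nat.pos_of_ne_zero h) one_lt_two

def numberOfConsecutiveOnes_alt (n : Int) : Int :=
  let fib := (fdAlt (n + 2).toNat).1
  (pvPow2Mod n.toNat - fib) % pvM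

-- ===== PRECONDITION & SPEC =====
-- Pre_: exactly the inputs where A returns; for non-positive n, A raises IndexError on the base-case stores.
def Pre_numberOfConsecutiveOnes (n : Int) : Prop := 1 ≤ n
instance (n : Int) : Decidable (Pre_numberOfConsecutiveOnes n) := by
  unfold Pre_numberOfConsecutiveOnes; infer_instance

def pvWitness_numberOfConsecutiveOnes : Int := 3

def Spec_numberOfConsecutiveOnes (n : Int) (out : Int) : Prop := out = numberOfConsecutiveOnes_alt n
instance (n : Int) (out : Int) : Decidable (Spec_numberOfConsecutiveOnes n out) := by
  unfold Spec_numberOfConsecutiveOnes; infer_instance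

-- ===== CLAIM (what is proved, stated in full; the proofs are below) =====
def Claim_equal_numberOfConsecutiveOnes : Prop :=
  ∀ (n : Int), Dom_numberOfConsecutiveOnes n → Pre_numberOfConsecutiveOnes n →
    Spec_numberOfConsecutiveOnes n (numberOfConsecutiveOnes n)

-- ===== LEMMAS AND PROOFS =====


lemma pvPow2Mod_eq (k : Nat) : pvPow2Mod k = (2 ^ k : Int) % pvM := by
  induction k using Nat.strong_induction_on with
  | _ k ih =>
    rw [pvPow2Mod]
    by_cases h : k = 0
    · subst h; norm_num [pvM]
    · rw [dif_neg h]
      have ih2 := ih (k / 2) (Nat.div_lt_self (Nat.pos_of_ne_zero h) one_lt_two)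
      simp only [ih2]
      have hr : (2:Int) ^ (k/2) % pvM ≡ 2 ^ (k/2) [ZMOD pvM] := Int.emod_emod_of_dvd _ dvd_rfl
      have hsq : (2:Int) ^ (k/2) * 2 ^ (k/2) = 2 ^ (2 * (k/2)) := by rw [two_mul, pow_add]
      by_cases hp : k % 2 = 0
      · rw [if_pos hp]
        have hk : 2 * (k/2) = k := by omega
        calc ((2:Int) ^ (k/2) % pvM) * (2 ^ (k/2) % pvM) % pvM
            = (2:Int) ^ (k/2) * 2 ^ (k/2) % pvM := hr.mul hr
          _ = 2 ^ k % pvM := by rw [hsq, hk]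
      · rw [if_neg hp]
        have hk : 2 * (k/2) + 1 = k := by omega
        calc ((2:Int) ^ (k/2) % pvM) * (2 ^ (k/2) % pvM) * 2 % pvM
            = (2:Int) ^ (k/2) * 2 ^ (k/2) * 2 % pvM := (hr.mul hr).mul (Int.ModEq.refl 2)
          _ = 2 ^ k % pvM := by rw [hsq, ← pow_succ, hk]

lemma fdAlt_eq (k : Nat) :
    fdAlt k = ((Nat.fib k : Int) % pvM, (Nat.fib (k + 1) : Int) % pvM) := by
  induction k using Nat.strong_induction_on with
  | _ k ih =>
    rw [fdAlt]
    by_cases h : k = 0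
    · subst h; norm_num [pvM]
    · rw [dif_neg h]
      have ih2 := ih (k / 2) (Nat.div_lt_self (Nat.pos_of_ne_zero h) one_lt_two)
      simp only [ih2]
      set m := k / 2 with hm
      have hA : (Nat.fib m : Int) % pvM ≡ (Nat.fib m : Int) [ZMOD pvM] :=
        Int.emod_emod_of_dvd _ dvd_rfl
      have hB : (Nat.fib (m+1) : Int) % pvM ≡ (Nat.fib (m+1) : Int) [ZMOD pvM] :=
        Int.emod_emod_of_dvd _ dvd_rfl
      have hle : Nat.fib m ≤ 2 * Nat.fib (m+1) :=
        le_trans (Nat.fib_le_fib_succ) (by omega)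
      have hcast : (Nat.fib (2*m) : Int) = (Nat.fib m : Int) * (2 * (Nat.fib (m+1) : Int) - (Nat.fib m : Int)) := by
        rw [Nat.fib_two_mul]
        push_cast [Nat.cast_sub hle]
        ring
      have hc : ((Nat.fib m : Int) % pvM) * (2 * ((Nat.fib (m+1) : Int) % pvM) - (Nat.fib m : Int) % pvM) % pvM
          = (Nat.fib (2*m) : Int) % pvM := by
        rw [hcast]
        exact hA.mul (((Int.ModEq.refl 2).mul hB).sub hA)
      have hd : ((Nat.fib m : Int) % pvM * ((Nat.fib m : Int) % pvM) + (Nat.fib (m+1) : Int) % pvM * ((Nat.fib (m+1) : Int) % pvM)) % pvM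
          = (Nat.fib (2*m+1) : Int) % pvM := by
        have : (Nat.fib (2*m+1) : Int) = (Nat.fib m : Int) * (Nat.fib m : Int) + (Nat.fib (m+1) : Int) * (Nat.fib (m+1) : Int) := by
          rw [Nat.fib_two_mul_add_one]; push_cast; ring
        rw [this]
        exact (hA.mul hA).add (hB.mul hB)
      by_cases hp : k % 2 = 1
      · rw [if_pos hp]
        have hk : k = 2*m + 1 := by omega
        have hsum : ((Nat.fib (2*m) : Int) % pvM + (Nat.fib (2*m+1) : Int) % pvM) % pvM
            = (Nat.fib (2*m+2) : Int) % pvM := by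
          have : (Nat.fib (2*m+2) : Int) = (Nat.fib (2*m) : Int) + (Nat.fib (2*m+1) : Int) := by
            rw [Nat.fib_add_two]; push_cast; ring
          rw [this]
          have h1 : (Nat.fib (2*m) : Int) % pvM ≡ (Nat.fib (2*m) : Int) [ZMOD pvM] :=
            Int.emod_emod_of_dvd _ dvd_rfl
          have h2 : (Nat.fib (2*m+1) : Int) % pvM ≡ (Nat.fib (2*m+1) : Int) [ZMOD pvM] :=
            Int.emod_emod_of_dvd _ dvd_rfl
          exact h1.add h2
        rw [hc, hd, hsum, hk]
      · rw [if_neg hp]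
        have hk : k = 2*m := by omega
        rw [hc, hd, hk]

-- A's dp loop computes Fibonacci mod pvM: invariant of the fold over range(2, N+1)
lemma loopA (N : Nat) :
    ∀ (d i : Nat), N + 1 ≤ i + d → 2 ≤ i →
    ∀ dp : List Int, dp.length = N + 1 →
    (∀ j : Nat, j < i → dp.getD j 0 = (Nat.fib (j+2) : Int) % pvM) →
    ∀ j : Nat, j < N + 1 →
      ((PySem.List.pyRange (i : Int) ((N : Int) + 1) 1).foldl
        (fun dp i => dp.set i.toNat
          ((dp.getD (i - 1).toNat 0 + dp.getD (i - 2).toNat 0) % pvM)) dp).getD j 0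
      = (Nat.fib (j+2) : Int) % pvM := by
  intro d
  induction d with
  | zero =>
    intro i hle h2 dp hlen hinv j hj
    rw [PySem.List.pyRange_one_eq_nil (by exact_mod_cast (by omega : N + 1 ≤ i))]
    exact hinv j (by omega)
  | succ d ih =>
    intro i hle h2 dp hlen hinv j hj
    by_cases hiN : N + 1 ≤ i
    · rw [PySem.List.pyRange_one_eq_nil (by exact_mod_cast hiN)]
      exact hinv j (by omega)
    · have hlt : (i : Int) < (N : Int) + 1 := by exact_mod_cast (by omega : i < N + 1)
      rw [PySem.List.pyRange_one_cons hlt]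
      rw [List.foldl_cons]
      have hcast1 : (i : Int) + 1 = ((i + 1 : Nat) : Int) := by push_cast; ring
      rw [hcast1]
      have hm1 : ((i : Int) - 1).toNat = i - 1 := by omega
      have hm2 : ((i : Int) - 2).toNat = i - 2 := by omega
      have hv : (dp.getD ((i : Int) - 1).toNat 0 + dp.getD ((i : Int) - 2).toNat 0) % pvM
          = (Nat.fib (i + 2) : Int) % pvM := by
        rw [hm1, hm2, hinv (i - 1) (by omega), hinv (i - 2) (by omega)]
        have e1 : i - 1 + 2 = i + 1 := by omega
        have e2 : i - 2 + 2 = i := by omega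
        rw [e1, e2]
        have hfib : (Nat.fib (i + 2) : Int) = (Nat.fib (i + 1) : Int) + (Nat.fib i : Int) := by
          rw [Nat.fib_add_two]; push_cast; ring
        rw [hfib]
        have ha : (Nat.fib (i+1) : Int) % pvM ≡ (Nat.fib (i+1) : Int) [ZMOD pvM] :=
          Int.emod_emod_of_dvd _ dvd_rfl
        have hb : (Nat.fib i : Int) % pvM ≡ (Nat.fib i : Int) [ZMOD pvM] :=
          Int.emod_emod_of_dvd _ dvd_rfl
        exact ha.add hb
      rw [hv, Int.toNat_natCast]
      refine ih (i + 1) (by omega) (by omega) _ (by simp [hlen]) ?_ j hj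
      intro j' hj'
      by_cases hji : j' = i
      · subst hji
        rw [List.getD_eq_getElem?_getD, List.getElem?_set_self (by omega : j' < dp.length)]
        rfl
      · rw [List.getD_eq_getElem?_getD, List.getElem?_set_ne (by omega : i ≠ j'),
          ← List.getD_eq_getElem?_getD]
        exact hinv j' (by omega)

-- Array.getD agrees with List.getD through toList
lemma arrGetD_toList (a : Array Int) (k : Nat) (d : Int) : a.getD k d = a.toList.getD k d := by
  simp [Array.getD, List.getD]
  rcases Nat.lt_or_ge k a.size with h | h
  · simp [h]
  · simp [Nat.not_lt.mpr h]

-- the Array fold of port A, seen through toList, is the List fold of loopA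
lemma foldA_toList (l : List Int) (a : Array Int) :
    (l.foldl
      (fun dp i => dp.setIfInBounds i.toNat
        ((dp.getD (i - 1).toNat 0 + dp.getD (i - 2).toNat 0) % pvM)) a).toList
    = l.foldl
      (fun dp i => dp.set i.toNat
        ((dp.getD (i - 1).toNat 0 + dp.getD (i - 2).toNat 0) % pvM)) a.toList := by
  induction l generalizing a with
  | nil => rfl
  | cons x xs ih =>
    rw [List.foldl_cons, List.foldl_cons, ih]
    rw [Array.toList_setIfInBounds, arrGetD_toList, arrGetD_toList]

theorem numberOfConsecutiveOnes_spec : Claim_equal_numberOfConsecutiveOnes := by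
  intro n hdom hpre
  unfold Spec_numberOfConsecutiveOnes
  unfold Pre_numberOfConsecutiveOnes at hpre
  lift n to Nat using (by omega : (0:Int) ≤ n) with N
  have hN : 1 ≤ N := by exact_mod_cast hpre
  have hB : numberOfConsecutiveOnes_alt (N : Int)
      = ((2:Int) ^ N % pvM - (Nat.fib (N + 2) : Int) % pvM) % pvM := by
    unfold numberOfConsecutiveOnes_alt
    have h2 : ((N : Int) + 2).toNat = N + 2 := by omega
    simp only [h2, Int.toNat_natCast, fdAlt_eq, pvPow2Mod_eq]
  rw [hB]
  by_cases h2 : (N : Int) = 2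
  · have hN2 : N = 2 := by exact_mod_cast h2
    subst hN2
    show numberOfConsecutiveOnes ((2:Nat) : Int) = _
    decide
  · have hA : numberOfConsecutiveOnes (N : Int)
        = (pvPow2Mod N -
            ((PySem.List.pyRange 2 ((N : Int) + 1) 1).foldl
              (fun dp i => dp.setIfInBounds i.toNat
                ((dp.getD (i - 1).toNat 0 + dp.getD (i - 2).toNat 0) % pvM))
              (((Array.replicate (N + 1) (0 : Int)).setIfInBounds 0 1).setIfInBounds 1 2)).getD N 0
            + pvM) % pvM := by
      unfold numberOfConsecutiveOnes
      rw [if_neg h2]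
      have hc : ((N : Int) + 1).toNat = N + 1 := by omega
      simp only [hc, Int.toNat_natCast]
    rw [hA]
    have hfold := loopA N (N - 1) 2 (by omega) (by omega)
      (((List.replicate (N + 1) (0 : Int)).set 0 1).set 1 2)
      (by simp)
      (by
        intro j hj
        interval_cases j
        · rw [List.getD_eq_getElem?_getD, List.getElem?_set_ne (by omega : (1:Nat) ≠ 0),
            List.getElem?_set_self (by simp only [List.length_replicate]; omega)]
          decide
        · rw [List.getD_eq_getElem?_getD,
            List.getElem?_set_self (by simp only [List.length_set, List.length_replicate]; omega)]
          decide)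
      N (by omega)
    push_cast at hfold
    have htl : ((PySem.List.pyRange 2 ((N : Int) + 1) 1).foldl
        (fun dp i => dp.setIfInBounds i.toNat
          ((dp.getD (i - 1).toNat 0 + dp.getD (i - 2).toNat 0) % pvM))
        (((Array.replicate (N + 1) (0 : Int)).setIfInBounds 0 1).setIfInBounds 1 2)).getD N 0
        = (Nat.fib (N + 2) : Int) % pvM := by
      rw [arrGetD_toList, foldA_toList]
      simp only [Array.toList_setIfInBounds, Array.toList_replicate]
      exact hfold
    rw [htl, pvPow2Mod_eq]
    simp only [pvM]
    omega
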